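-- pv_equiv track=rewrite | github.com/Anshdubey47/AI-Traffic-System | app.py | decode_route
-- ===== SOURCE A (Python) =====
-- def decode_route(best_route):
--     path = [(0, 0)]
--     cx, cy = 0, 0
--     for move in best_route:
--         if move == 0:
--             cx += 1
--         else:
--             cy += 1
--         path.append((cx, cy))
--     return path
-- ===== SOURCE B (Python) =====
-- def decode_route(best_route):
--     # Divide and conquer: solve each half independently, then translate the
--     # right half's sub-path by the left half's endpoint and join them.
--     n = len(best_route)
--     if n == 0:
--         return [(0, 0)]
--     if n == 1:
--         return [(0, 0), (1, 0) if best_route[0] == 0 else (0, 1)]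
--     mid = n // 2
--     left = decode_route(best_route[:mid])
--     right = decode_route(best_route[mid:])
--     lx, ly = left[-1]
--     return left + [(x + lx, y + ly) for (x, y) in right[1:]]
-- ===== Notes on version B (the rewrite author's own statement) =====
-- stated objective: alternative
-- what changed: B replaces A's single stateful left-to-right pass with a divide-and-conquer recursion: it decodes each half of the move list independently and translates the right half's sub-path by the left half's endpoint.
import Mathlib
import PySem

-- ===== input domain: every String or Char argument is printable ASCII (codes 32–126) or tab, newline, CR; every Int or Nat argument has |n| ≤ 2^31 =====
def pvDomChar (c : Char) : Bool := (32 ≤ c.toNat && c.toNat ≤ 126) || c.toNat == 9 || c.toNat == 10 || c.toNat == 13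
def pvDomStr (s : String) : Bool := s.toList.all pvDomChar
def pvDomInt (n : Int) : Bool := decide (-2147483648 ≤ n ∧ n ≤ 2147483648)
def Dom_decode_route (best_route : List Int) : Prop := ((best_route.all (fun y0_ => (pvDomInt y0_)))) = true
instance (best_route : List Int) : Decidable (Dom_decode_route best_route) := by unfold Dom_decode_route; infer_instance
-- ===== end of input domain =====

-- B decodes by divide and conquer (solve each half, translate the right sub-path by the left endpoint) instead of A's single stateful pass; same return value.

-- ===== PORT A =====
-- loop over moves carrying (cx, cy); emits the updated point after each move
def decodeRouteLoopA (moves : List Int) (cx cy : Int) : List (Int × Int) :=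
  match moves with
  | [] => []
  | move :: rest =>
    if move = 0 then
      (cx + 1, cy) :: decodeRouteLoopA rest (cx + 1) cy
    else
      (cx, cy + 1) :: decodeRouteLoopA rest cx (cy + 1)

def decode_route (best_route : List Int) : List (Int × Int) :=
  (0, 0) :: decodeRouteLoopA best_route 0 0

-- ===== PORT B =====
-- termination helper for the two recursive calls on the halves
theorem decodeRouteMid_lt (n : Nat) (h : ¬ n = 0) (h1 : ¬ n = 1) :
    (PySem.Int.floordiv (n : Int) 2) = ((n / 2 : Nat) : Int) ∧ 1 ≤ n / 2 ∧ n / 2 < n := by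
  refine ⟨by exact_mod_cast PySem.Int.floordiv_natCast n 2, by omega, by omega⟩

-- divide and conquer, as in Source B: halves solved recursively, right half translated
def decode_route_alt (best_route : List Int) : List (Int × Int) :=
  if h0 : best_route.length = 0 then [(0, 0)]
  else if h1 : best_route.length = 1 then
    [(0, 0), if PySem.List.pyGetD best_route 0 0 = 0 then (1, 0) else (0, 1)]
  else
    let mid := PySem.Int.floordiv (best_route.length : Int) 2
    let left := decode_route_alt (PySem.List.slice best_route none (some mid))
    let right := decode_route_alt (PySem.List.slice best_route (some mid) none)
    let last := PySem.List.pyGetD left (-1) (0, 0)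
    left ++ (PySem.List.slice right (some 1) none).map (fun p => (p.1 + last.1, p.2 + last.2))
termination_by best_route.length
decreasing_by
  · obtain ⟨hm, hge, hlt⟩ := decodeRouteMid_lt best_route.length h0 h1
    rw [hm, PySem.List.slice_to_natCast]
    simp only [List.length_take]
    omega
  · obtain ⟨hm, hge, hlt⟩ := decodeRouteMid_lt best_route.length h0 h1
    rw [hm, PySem.List.slice_from_natCast]
    simp only [List.length_drop]
    omega

-- ===== PRECONDITION & SPEC =====
def Spec_decode_route (best_route : List Int) (out : List (Int × Int)) : Prop := out = decode_route_alt best_route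
instance (best_route : List Int) (out : List (Int × Int)) : Decidable (Spec_decode_route best_route out) := by unfold Spec_decode_route; infer_instance

-- ===== CLAIM =====
def Claim_equal_decode_route : Prop := ∀ (best_route : List Int), Dom_decode_route best_route → Spec_decode_route best_route (decode_route best_route)

-- ===== LEMMAS AND PROOFS =====

theorem loopA_shift (moves : List Int) (cx cy : Int) :
    decodeRouteLoopA moves cx cy
      = (decodeRouteLoopA moves 0 0).map (fun p => (p.1 + cx, p.2 + cy)) := by
  induction moves generalizing cx cy with
  | nil => rfl
  | cons m rest ih =>
    by_cases h : m = 0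
    · simp only [decodeRouteLoopA, h, if_pos, List.map_cons]
      rw [ih (cx + 1) cy, ih (0 + 1) 0]
      simp only [List.map_map]
      refine congrArg₂ _ (by simp [Prod.ext_iff]; omega) (List.map_congr_left ?_)
      intro p _; simp [Function.comp, Prod.ext_iff]; omega
    · simp only [decodeRouteLoopA, if_neg h, List.map_cons]
      rw [ih cx (cy + 1), ih 0 (0 + 1)]
      simp only [List.map_map]
      refine congrArg₂ _ (by simp [Prod.ext_iff]; omega) (List.map_congr_left ?_)
      intro p _; simp [Function.comp, Prod.ext_iff]; omega

theorem loopA_append (u v : List Int) (cx cy : Int) :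
    decodeRouteLoopA (u ++ v) cx cy
      = decodeRouteLoopA u cx cy
        ++ decodeRouteLoopA v (cx + (u.count 0 : Int)) (cy + (u.length : Int) - (u.count 0 : Int)) := by
  induction u generalizing cx cy with
  | nil => simp [decodeRouteLoopA]
  | cons m rest ih =>
    by_cases h : m = 0
    · simp only [List.cons_append, decodeRouteLoopA]
      rw [if_pos h, if_pos h, ih, List.cons_append]
      refine congrArg _ (congrArg₂ _ rfl (congrArg₂ _ ?_ ?_)) <;>
        simp [h] <;> push_cast <;> omega
    · simp only [List.cons_append, decodeRouteLoopA]
      rw [if_neg h, if_neg h, ih, List.cons_append]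
      refine congrArg _ (congrArg₂ _ rfl (congrArg₂ _ ?_ ?_)) <;>
        simp [h] <;> push_cast <;> omega

theorem loopA_getLast? (u : List Int) (cx cy : Int) :
    ((cx, cy) :: decodeRouteLoopA u cx cy).getLast?
      = some (cx + (u.count 0 : Int), cy + (u.length : Int) - (u.count 0 : Int)) := by
  induction u generalizing cx cy with
  | nil => simp [decodeRouteLoopA]
  | cons m rest ih =>
    by_cases h : m = 0
    · simp only [decodeRouteLoopA]
      rw [if_pos h, List.getLast?_cons_cons, ih (cx + 1) cy]
      refine congrArg _ (congrArg₂ _ ?_ ?_) <;>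
        simp [h] <;> push_cast <;> omega
    · simp only [decodeRouteLoopA]
      rw [if_neg h, List.getLast?_cons_cons, ih cx (cy + 1)]
      refine congrArg _ (congrArg₂ _ ?_ ?_) <;>
        simp [h] <;> push_cast <;> omega

theorem pyGetD_neg_one_of_getLast? {α : Type} (xs : List α) (d a : α)
    (h : xs.getLast? = some a) : PySem.List.pyGetD xs (-1) d = a := by
  have hne : xs ≠ [] := by intro he; rw [he] at h; simp at h
  rw [PySem.List.pyGetD_neg_one xs d hne]
  rw [List.getLast?_eq_some_getLast hne] at h
  exact Option.some.inj h

theorem alt_eq_decode (n : Nat) : ∀ (l : List Int), l.length = n →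
    decode_route_alt l = (0, 0) :: decodeRouteLoopA l 0 0 := by
  induction n using Nat.strong_induction_on with
  | _ n ih =>
    intro l hl
    rw [decode_route_alt]
    by_cases h0 : l.length = 0
    · rw [dif_pos h0]
      rw [List.length_eq_zero_iff] at h0
      subst h0; rfl
    · rw [dif_neg h0]
      by_cases h1 : l.length = 1
      · rw [dif_pos h1]
        rw [List.length_eq_one_iff] at h1
        obtain ⟨m, rfl⟩ := h1
        rw [PySem.List.pyGetD_zero_cons]
        by_cases hm : m = 0 <;> simp [decodeRouteLoopA, hm]
      · rw [dif_neg h1]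
        obtain ⟨hm, hge, hlt⟩ := decodeRouteMid_lt l.length h0 h1
        simp only [hm, PySem.List.slice_to_natCast, PySem.List.slice_from_natCast]
        set k := l.length / 2 with hk
        have hleft : decode_route_alt (l.take k) = (0, 0) :: decodeRouteLoopA (l.take k) 0 0 := by
          refine ih (l.take k).length ?_ _ rfl
          simp only [List.length_take]; omega
        have hright : decode_route_alt (l.drop k) = (0, 0) :: decodeRouteLoopA (l.drop k) 0 0 := by
          refine ih (l.drop k).length ?_ _ rfl
          simp only [List.length_drop]; omega
        rw [hleft, hright]
        rw [pyGetD_neg_one_of_getLast? _ _ _ (loopA_getLast? (l.take k) 0 0)]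
        rw [PySem.List.slice_from_one]
        have hsplit : l = l.take k ++ l.drop k := (List.take_append_drop k l).symm
        conv_rhs => rw [hsplit]
        rw [loopA_append, loopA_shift (l.drop k) (0 + ((l.take k).count 0 : Int))]
        simp only [List.tail_cons, List.cons_append]

-- ===== VERDICT =====
theorem decode_route_spec : Claim_equal_decode_route := by
  intro l _
  show decode_route l = decode_route_alt l
  rw [alt_eq_decode l.length l rfl]
  rfl
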